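-- pv_equiv track=rewrite | github.com/SundeepChaluvadi/Course-Plan | Testing Modules/flask_testing/priority_sorter.py | calendar_generator
-- ===== SOURCE A (Python) =====
-- def calendar_generator(start_season,summer_inc,sems):
--     semseasons=["WA","CO"]
--     if start_season=="SP":
--         seasons=["SP","SU","FA"]
--     elif start_season=="SU":
--         seasons=["SU","FA","SP"]
--     else:
--         seasons=["FA","SP","SU"]
--     if summer_inc==False:
--         seasons.remove("SU")
--     for i in range(sems):
--         semseasons.append(seasons[i%len(seasons)])
--     return semseasons
-- ===== SOURCE B (Python) =====
-- def calendar_generator(start_season, summer_inc, sems):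
--     cycles = {"SP": ["SP", "SU", "FA"], "SU": ["SU", "FA", "SP"]}
--     queue = cycles.get(start_season, ["FA", "SP", "SU"])
--     if summer_inc == False:
--         queue = [s for s in queue if s != "SU"]
--     out = ["WA", "CO"]
--     k = sems
--     while k > 0:
--         out.append(queue[0])
--         queue = queue[1:] + queue[:1]
--         k -= 1
--     return out
-- ===== Notes on version B (the rewrite author's own statement) =====
-- stated objective: alternative
-- what changed: Replaced the if/elif season selection plus modulo indexing seasons[i % n] with a dict lookup for the cycle and a rotating-queue loop that emits the queue head and rotates it each step, so no index arithmetic is used.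
import Mathlib
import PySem

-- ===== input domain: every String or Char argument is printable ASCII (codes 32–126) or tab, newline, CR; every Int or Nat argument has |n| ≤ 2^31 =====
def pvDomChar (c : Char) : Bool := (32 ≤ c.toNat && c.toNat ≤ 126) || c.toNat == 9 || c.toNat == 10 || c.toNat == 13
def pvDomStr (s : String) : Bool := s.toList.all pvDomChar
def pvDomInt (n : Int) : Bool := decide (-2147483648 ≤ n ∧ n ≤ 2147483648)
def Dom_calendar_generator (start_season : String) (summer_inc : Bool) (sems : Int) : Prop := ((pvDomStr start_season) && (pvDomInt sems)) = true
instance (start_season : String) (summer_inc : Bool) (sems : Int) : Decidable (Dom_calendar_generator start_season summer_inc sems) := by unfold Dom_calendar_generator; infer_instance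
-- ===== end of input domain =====

-- B selects the season cycle with a dict lookup and builds the semester list with a rotating queue
-- (emit head, rotate) instead of A's if/elif selection plus modulo indexing (alternative).
-- ===== PORT A =====
-- seasons.remove("SU"): "SU" is always a member, so remove? is always some; getD seasons is never taken.
-- seasons[i % len(seasons)]: 0 ≤ i % n < n always, so pyGetD's default "" is never taken (no IndexError possible).
def calendar_generator (start_season : String) (summer_inc : Bool) (sems : Int) : List String :=
  let semseasons : List String := ["WA", "CO"]
  let seasons : List String :=
    if start_season = "SP" then ["SP", "SU", "FA"]
    else if start_season = "SU" then ["SU", "FA", "SP"]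
    else ["FA", "SP", "SU"]
  let seasons : List String :=
    if summer_inc = false then (PySem.List.remove? seasons "SU").getD seasons else seasons
  (PySem.List.pyRange 0 sems 1).foldl
    (fun acc i => acc ++ [PySem.List.pyGetD seasons (PySem.Int.mod i (seasons.length : Int)) ""])
    semseasons

-- ===== PORT B =====
-- the while loop of Source B: queue[0] is ported as pyGetD _ 0 "" (the queue is never empty, so the
-- default "" is never taken); queue[1:] + queue[:1] is slice 1 none ++ slice none 1.
def cgRotLoop (queue : List String) (out : List String) (k : Int) : List String :=
  if h : 0 < k then
    cgRotLoop (PySem.List.slice queue (some 1) none ++ PySem.List.slice queue none (some 1))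
      (out ++ [PySem.List.pyGetD queue 0 ""]) (k - 1)
  else out
termination_by k.toNat
decreasing_by omega

def calendar_generator_alt (start_season : String) (summer_inc : Bool) (sems : Int) : List String :=
  let cycles : PySem.Dict String (List String) :=
    PySem.Dict.ofList [("SP", ["SP", "SU", "FA"]), ("SU", ["SU", "FA", "SP"])]
  let queue : List String := (PySem.Dict.get? cycles start_season).getD ["FA", "SP", "SU"]
  let queue : List String :=
    if summer_inc = false then queue.filter (fun s => s ≠ "SU") else queue
  cgRotLoop queue ["WA", "CO"] sems

-- ===== PRECONDITION & SPEC =====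
def Spec_calendar_generator (start_season : String) (summer_inc : Bool) (sems : Int) (out : List String) : Prop := out = calendar_generator_alt start_season summer_inc sems
instance (start_season : String) (summer_inc : Bool) (sems : Int) (out : List String) : Decidable (Spec_calendar_generator start_season summer_inc sems out) := by unfold Spec_calendar_generator; infer_instance

-- ===== CLAIM (what is proved, stated in full; the proofs are below) =====
def Claim_equal_calendar_generator : Prop := ∀ (start_season : String) (summer_inc : Bool) (sems : Int), Dom_calendar_generator start_season summer_inc sems → Spec_calendar_generator start_season summer_inc sems (calendar_generator start_season summer_inc sems)

-- ===== LEMMAS AND PROOFS =====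

-- one rotation step of the queue is List.rotate 1
lemma pvRotStep (xs : List String) :
    PySem.List.slice xs (some 1) none ++ PySem.List.slice xs none (some 1) = xs.rotate 1 := by
  rw [PySem.List.slice_from_one,
    show (PySem.List.slice xs none (some 1)) = xs.take (1:Nat) from PySem.List.slice_to_natCast xs 1,
    List.rotate_eq_drop_append_take_mod]
  match xs with
  | [] => simp
  | [a] => simp
  | a :: b :: t => simp

-- A's seasons list and B's queue coincide in every case
lemma pvSeasonsEq (ss : String) (si : Bool) :
    (if si = false then
        (PySem.List.remove? (if ss = "SP" then ["SP", "SU", "FA"] else if ss = "SU" then ["SU", "FA", "SP"] else ["FA", "SP", "SU"]) "SU").getD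
          (if ss = "SP" then ["SP", "SU", "FA"] else if ss = "SU" then ["SU", "FA", "SP"] else ["FA", "SP", "SU"])
      else (if ss = "SP" then ["SP", "SU", "FA"] else if ss = "SU" then ["SU", "FA", "SP"] else ["FA", "SP", "SU"]))
    = (if si = false then
        ((PySem.Dict.get? (PySem.Dict.ofList [("SP", ["SP", "SU", "FA"]), ("SU", ["SU", "FA", "SP"])]) ss).getD ["FA", "SP", "SU"]).filter (fun s => s ≠ "SU")
      else ((PySem.Dict.get? (PySem.Dict.ofList [("SP", ["SP", "SU", "FA"]), ("SU", ["SU", "FA", "SP"])]) ss).getD ["FA", "SP", "SU"])) := by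
  by_cases h1 : ss = "SP"
  · subst h1; cases si <;> decide
  · by_cases h2 : ss = "SU"
    · subst h2; cases si <;> decide
    · have hd : PySem.Dict.get? (PySem.Dict.ofList [("SP", ["SP", "SU", "FA"]), ("SU", ["SU", "FA", "SP"])]) ss = none := by
        simp [PySem.Dict.get?, PySem.Dict.ofList, PySem.Dict.update, PySem.Dict.insert,
          PySem.Dict.empty, PySem.Dict.contains, Ne.symm h1, Ne.symm h2]
      rw [hd]; simp only [h1, h2, if_false, Option.getD_none]
      cases si <;> decide

-- B's queue is never empty
lemma pvQueueNe (ss : String) (si : Bool) :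
    (if si = false then
        ((PySem.Dict.get? (PySem.Dict.ofList [("SP", ["SP", "SU", "FA"]), ("SU", ["SU", "FA", "SP"])]) ss).getD ["FA", "SP", "SU"]).filter (fun s => s ≠ "SU")
      else ((PySem.Dict.get? (PySem.Dict.ofList [("SP", ["SP", "SU", "FA"]), ("SU", ["SU", "FA", "SP"])]) ss).getD ["FA", "SP", "SU"]))
    ≠ [] := by
  by_cases h1 : ss = "SP"
  · subst h1; cases si <;> decide
  · by_cases h2 : ss = "SU"
    · subst h2; cases si <;> decide
    · have hd : PySem.Dict.get? (PySem.Dict.ofList [("SP", ["SP", "SU", "FA"]), ("SU", ["SU", "FA", "SP"])]) ss = none := by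
        simp [PySem.Dict.get?, PySem.Dict.ofList, PySem.Dict.update, PySem.Dict.insert,
          PySem.Dict.empty, PySem.Dict.contains, Ne.symm h1, Ne.symm h2]
      rw [hd]; cases si <;> decide

-- B's rotating loop, started from xs rotated j times, produces the cyclic map of A's loop
lemma pvRotLoopEq (xs : List String) (hx : xs ≠ []) (m : Nat) :
    ∀ (j : Nat) (out : List String),
      cgRotLoop (xs.rotate j) out (m : Int)
        = out ++ (List.range m).map (fun i => xs.getD ((j + i) % xs.length) "") := by
  have hn : 0 < xs.length := List.length_pos_iff.mpr hx
  induction m with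
  | zero => intro j out; rw [cgRotLoop]; simp
  | succ m ih =>
    intro j out
    rw [cgRotLoop, dif_pos (by omega : (0:Int) < ((m + 1 : Nat) : Int))]
    have hcast : ((m + 1 : Nat) : Int) - 1 = (m : Int) := by push_cast; ring
    rw [hcast, pvRotStep, List.rotate_rotate, ih (j + 1)]
    have hhd : PySem.List.pyGetD (xs.rotate j) 0 "" = xs.getD (j % xs.length) "" := by
      have h0 : 0 < (xs.rotate j).length := by rw [List.length_rotate]; exact hn
      rw [show ((0:Int)) = ((0:Nat):Int) from rfl, PySem.List.pyGetD_natCast,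
        List.getD_eq_getElem?_getD, List.getElem?_eq_getElem h0, List.getElem_rotate,
        List.getD_eq_getElem?_getD, List.getElem?_eq_getElem (Nat.mod_lt j hn)]
      simp only [Option.getD_some, Nat.zero_add]
    have hfun : (fun i => xs.getD ((j + 1 + i) % xs.length) "")
        = (fun i => xs.getD ((j + (i + 1)) % xs.length) "") := by
      funext i; congr 2; omega
    rw [hhd, hfun, List.range_succ_eq_map, List.map_cons, List.map_map, List.append_assoc,
      List.singleton_append]
    rfl

-- A's indexing loop equals B's rotating-queue loop
lemma pvMainLoop (xs : List String) (hx : xs ≠ []) (sems : Int) (base : List String) :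
    (PySem.List.pyRange 0 sems 1).foldl
        (fun acc i => acc ++ [PySem.List.pyGetD xs (PySem.Int.mod i (xs.length : Int)) ""]) base
      = cgRotLoop xs base sems := by
  rw [PySem.List.foldl_append_singleton_eq_map, PySem.List.pyRange_one]
  by_cases h : sems ≤ 0
  · rw [cgRotLoop, dif_neg (by omega : ¬ (0:Int) < sems)]
    have h0 : (sems - 0).toNat = 0 := by omega
    rw [h0]; simp
  · obtain ⟨m, rfl⟩ : ∃ m : Nat, sems = (m : Int) := ⟨sems.toNat, by omega⟩
    have hm0 : ((m : Int) - 0).toNat = m := by omega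
    simp only [hm0, zero_add, PySem.Int.mod_natCast, PySem.List.pyGetD_natCast, List.map_map,
      Function.comp_def]
    rw [show xs = xs.rotate 0 from (List.rotate_zero xs).symm, pvRotLoopEq xs hx m 0]
    simp

-- ===== VERDICT (by name: the statement is the Claim_ definition above) =====
theorem calendar_generator_spec : Claim_equal_calendar_generator := by
  intro ss si sems _
  simp only [Spec_calendar_generator, calendar_generator, calendar_generator_alt]
  rw [pvSeasonsEq ss si]
  exact pvMainLoop _ (pvQueueNe ss si) sems _
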